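-- pv_equiv track=rewrite | github.com/kh277/BOJ | 백준/Gold/1917. 정육면체 전개도/정육면체 전개도.py | solve
-- ===== SOURCE A (Python) =====
-- def checkAllZero(A):
--     for i in A:
--         if i != 0:
--             return False
--
--     return True
--
-- def deleteBlank(grid):
--     canLeftX = [0, len(grid[0])]
--     canLeftY = [0, len(grid)]
--
--     # 위쪽 가로줄 제거
--     for y in range(len(grid)):
--         if checkAllZero(grid[y]) == True:
--             canLeftY[0] += 1
--         else:
--             break
--
--     # 아래쪽 가로줄 제거
--     for y in range(len(grid)-1, -1, -1):
--         if checkAllZero(grid[y]) == True: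
--             canLeftY[1] -= 1
--         else:
--             break
--
--     # 앞쪽 가로줄 제거
--     for x in range(len(grid[0])):
--         if checkAllZero([i[x] for i in grid]) == True:
--             canLeftX[0] += 1
--         else:
--             break
--
--     # 뒤쪽 가로줄 제거
--     for x in range(len(grid[0])-1, -1, -1):
--         if checkAllZero([i[x] for i in grid]) == True:
--             canLeftX[1] -= 1
--         else:
--             break
--
--     return [i[canLeftX[0]:canLeftX[1]] for i in grid[canLeftY[0]:canLeftY[1]]]
--
-- def rotateGrid(grid):
--     result = [[0 for _ in range(len(grid))] for _ in range(len(grid[0]))]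
--
--     for y in range(len(grid)):
--         for x in range(len(grid[0])):
--             result[x][y] = grid[y][x]
--
--     return result
--
-- def solve(grid):
--     # 배열의 가장자리 0 제거
--     stripGrid = deleteBlank(grid)
--
--     # 가로가 더 작아지도록 배열 회전
--     if len(stripGrid) > len(stripGrid[0]):
--         stripGrid = rotateGrid(stripGrid)
--
--     # 이진수 형태로 변환
--     binNum = ''.join(''.join(str(num) for num in row) for row in stripGrid)
--
--     diagramSet = {'100011111000', '100011110100', '100011110010', '100011110001',
--                 '010011111000', '010011110100', '010011110010', '010011110001',
--                 '001011111000', '001011110100', '001011110010', '001011110001',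
--                 '000111111000', '000111110100', '000111110010', '000111110001',
--                 '110001110100', '001111100010', '001011100011', '010001111100',
--                 '110001110010', '001111100100', '010011100011', '001001111100',
--                 '110001110001', '001111101000', '000101111100', '100011100011',
--                 '110001100011', '001101101100', '1110000111', '0011111100'}
--
--     # set에 포함 유무 체크
--     if binNum in diagramSet:
--         return 'yes'
--
--     return 'no'
-- ===== SOURCE B (Python) =====
-- _DIAGRAMS = {'100011111000', '100011110100', '100011110010', '100011110001',
--              '010011111000', '010011110100', '010011110010', '010011110001',
--              '001011111000', '001011110100', '001011110010', '001011110001',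
--              '000111111000', '000111110100', '000111110010', '000111110001',
--              '110001110100', '001111100010', '001011100011', '010001111100',
--              '110001110010', '001111100100', '010011100011', '001001111100',
--              '110001110001', '001111101000', '000101111100', '100011100011',
--              '110001100011', '001101101100', '1110000111', '0011111100'}
--
-- def solve(grid):
--     # Coordinate-set view: no cropped grid, no transpose.  Collect the coordinates of
--     # the nonzero cells, take their bounding box, and serialize the original grid
--     # directly through an index order (column-major when the box is taller than wide).
--     coords = [(y, x) for y in range(len(grid)) for x in range(len(grid[y])) if grid[y][x] != 0]
--     y0 = min(y for y, _ in coords)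
--     y1 = max(y for y, _ in coords)
--     x0 = min(x for _, x in coords)
--     x1 = max(x for _, x in coords)
--     if y1 - y0 > x1 - x0:
--         order = [(y, x) for x in range(x0, x1 + 1) for y in range(y0, y1 + 1)]
--     else:
--         order = [(y, x) for y in range(y0, y1 + 1) for x in range(x0, x1 + 1)]
--     binNum = ''.join(str(grid[y][x]) for y, x in order)
--     return 'yes' if binNum in _DIAGRAMS else 'no'
-- ===== Notes on version B (the rewrite author's own statement) =====
-- stated objective: simpler
-- what changed: B never builds a cropped grid or a transpose: it collects the coordinate set of nonzero cells in one comprehension, takes the min/max bounding box, and serializes the original grid directly through a row-major or column-major index order (column-major replacing A's four trim loops plus hand-written rotateGrid plus nested join).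
-- outside the precondition, e.g. on solve([[1], [1, 1]]): A returns 'no', B raises IndexError; on solve([[], [1, 9], [9, 9], [-1, -3]]): A returns 'no', B returns 'no'
import Mathlib
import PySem

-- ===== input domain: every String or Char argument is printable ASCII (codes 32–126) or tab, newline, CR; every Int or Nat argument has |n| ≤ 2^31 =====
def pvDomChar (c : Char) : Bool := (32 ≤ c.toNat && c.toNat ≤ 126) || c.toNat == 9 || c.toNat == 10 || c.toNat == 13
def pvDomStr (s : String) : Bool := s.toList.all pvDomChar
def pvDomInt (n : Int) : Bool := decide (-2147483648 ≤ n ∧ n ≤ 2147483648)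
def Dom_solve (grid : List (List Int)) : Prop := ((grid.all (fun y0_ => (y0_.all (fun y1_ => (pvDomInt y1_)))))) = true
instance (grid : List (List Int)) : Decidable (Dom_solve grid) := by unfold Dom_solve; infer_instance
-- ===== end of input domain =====

-- B drops A's whole grid-rewriting pipeline (four trim loops, crop, hand-written transpose,
-- nested join): it collects the coordinates of the nonzero cells, takes their min/max bounding
-- box, and serializes the ORIGINAL grid through a row- or column-major index order; objective: simpler.

-- the literal set of serialized cube nets, shared data of both ports
def diagramList : List String :=
  ["100011111000", "100011110100", "100011110010", "100011110001",
   "010011111000", "010011110100", "010011110010", "010011110001",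
   "001011111000", "001011110100", "001011110010", "001011110001",
   "000111111000", "000111110100", "000111110010", "000111110001",
   "110001110100", "001111100010", "001011100011", "010001111100",
   "110001110010", "001111100100", "010011100011", "001001111100",
   "110001110001", "001111101000", "000101111100", "100011100011",
   "110001100011", "001101101100", "1110000111", "0011111100"]

-- ===== PORT A =====
def checkAllZero : List Int → Bool
  | [] => true
  | i :: rest => if i ≠ 0 then false else checkAllZero rest

-- 'for y in range(len(grid)): if allzero: count += 1 else: break'
def countLeadRows : List (List Int) → Nat
  | [] => 0
  | r :: rs => if checkAllZero r then 1 + countLeadRows rs else 0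

-- '[i[x] for i in grid]'; getD is exact while x is in range for every row (guaranteed by Pre_)
def colOf (grid : List (List Int)) (x : Nat) : List Int :=
  grid.map (fun i => i.getD x 0)

-- the same break-loop over a list of column indices
def countLeadCols (grid : List (List Int)) : List Nat → Nat
  | [] => 0
  | x :: xs => if checkAllZero (colOf grid x) then 1 + countLeadCols grid xs else 0

-- python slice l[a:b] for 0 ≤ a, b equals (l.drop a).take (b - a) (Nat subtraction; exact)
def deleteBlank (grid : List (List Int)) : List (List Int) :=
  let m := (grid.headD []).length
  let y0 := countLeadRows grid
  let y1 := grid.length - countLeadRows grid.reverse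
  let x0 := countLeadCols grid (List.range m)
  let x1 := m - countLeadCols grid ((List.range m).reverse)
  ((grid.drop y0).take (y1 - y0)).map (fun i => (i.drop x0).take (x1 - x0))

-- result[x][y] = grid[y][x] over the full index rectangle (0 is the initialisation value)
def rotateGrid (grid : List (List Int)) : List (List Int) :=
  (List.range (grid.headD []).length).map (fun x =>
    (List.range grid.length).map (fun y => ((grid.getD y []).getD x 0)))

def solve (grid : List (List Int)) : String :=
  let stripGrid := deleteBlank grid
  let stripGrid := if stripGrid.length > (stripGrid.headD []).length then rotateGrid stripGrid else stripGrid
  let binNum := PySem.Str.join "" (stripGrid.map (fun row => PySem.Str.join "" (row.map PySem.Int.toStr)))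
  if diagramList.contains binNum then "yes" else "no"

-- ===== PORT B =====
-- '[(y, x) for y in range(len(grid)) for x in range(len(grid[y])) if grid[y][x] != 0]';
-- indices come from range(len(..)), so getD is exact
def coordsOf (grid : List (List Int)) : List (Nat × Nat) :=
  (List.range grid.length).flatMap (fun y =>
    ((List.range (grid.getD y []).length).filter
        (fun x => decide ((grid.getD y []).getD x 0 ≠ 0))).map (fun x => (y, x)))

def solve_alt (grid : List (List Int)) : String :=
  let coords := coordsOf grid
  -- min/max over a nonempty generator (Pre_ guarantees a nonzero cell); '.getD 0' totalizes
  let y0 := ((coords.map (fun p => p.1)).min?).getD 0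
  let y1 := ((coords.map (fun p => p.1)).max?).getD 0
  let x0 := ((coords.map (fun p => p.2)).min?).getD 0
  let x1 := ((coords.map (fun p => p.2)).max?).getD 0
  -- range(a, b) on naturals a ≤ b is List.range' a (b - a) (exact; Nat subtraction as in Python here)
  let order := if y1 - y0 > x1 - x0 then
      (List.range' x0 (x1 + 1 - x0)).flatMap (fun x =>
        (List.range' y0 (y1 + 1 - y0)).map (fun y => (y, x)))
    else
      (List.range' y0 (y1 + 1 - y0)).flatMap (fun y =>
        (List.range' x0 (x1 + 1 - x0)).map (fun x => (y, x)))
  let binNum := PySem.Str.join "" (order.map (fun p => PySem.Int.toStr ((grid.getD p.1 []).getD p.2 0)))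
  if diagramList.contains binNum then "yes" else "no"

-- ===== PRECONDITION & SPEC =====
-- Pre_ excludes: the empty grid and all-zero grids (A raises IndexError there), and ragged
-- grids (A raises IndexError on most of them; where it happens to return, its value depends
-- on which short row the len(grid[0])-based column scan reaches — see the cites in the claim).
def Pre_solve (grid : List (List Int)) : Prop :=
  grid ≠ [] ∧ (∀ r ∈ grid, r.length = (grid.headD []).length) ∧
    grid.any (fun r => r.any (fun v => decide (v ≠ 0))) = true
instance (grid : List (List Int)) : Decidable (Pre_solve grid) := by unfold Pre_solve; infer_instance

def pvWitness_solve : List (List Int) :=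
  [[0,1,0,0],[1,1,1,1],[0,1,0,0]]

def Spec_solve (grid : List (List Int)) (out : String) : Prop := out = solve_alt grid
instance (grid : List (List Int)) (out : String) : Decidable (Spec_solve grid out) := by unfold Spec_solve; infer_instance

-- ===== CLAIM (what is proved, stated in full; the proofs are below) =====
def Claim_equal_solve : Prop := ∀ (grid : List (List Int)), Dom_solve grid → Pre_solve grid → Spec_solve grid (solve grid)

-- ===== LEMMAS AND PROOFS =====

theorem cz_any (r : List Int) : checkAllZero r = !(r.any (fun v => decide (v ≠ 0))) := by
  induction r with
  | nil => rfl
  | cons a t ih => by_cases h : a = 0 <;> simp [checkAllZero, h, ih]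

theorem clr_lt_all (g : List (List Int)) : ∀ y < countLeadRows g, checkAllZero (g.getD y []) = true := by
  induction g with
  | nil => simp [countLeadRows]
  | cons r rs ih =>
    intro y hy
    by_cases h : checkAllZero r
    · cases y with
      | zero => simpa [List.getD] using h
      | succ k =>
        simp only [countLeadRows, h, if_true] at hy
        simpa [List.getD] using ih k (by omega)
    · simp [countLeadRows, h] at hy

theorem clr_stop (g : List (List Int)) (h : countLeadRows g < g.length) :
    checkAllZero (g.getD (countLeadRows g) []) = false := by
  induction g with
  | nil => simp at h
  | cons r rs ih =>
    by_cases hr : checkAllZero r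
    · simp only [countLeadRows, hr, if_true] at h ⊢
      have hlt : countLeadRows rs < rs.length := by simp at h; omega
      have := ih hlt
      simpa [List.getD, Nat.add_comm] using this
    · simp [countLeadRows, hr, List.getD]

theorem clr_lt_of_ex (g : List (List Int)) (h : ∃ r ∈ g, checkAllZero r = false) :
    countLeadRows g < g.length := by
  induction g with
  | nil => simp at h
  | cons r rs ih =>
    by_cases hr : checkAllZero r
    · obtain ⟨s, hs, hcz⟩ := h
      rcases List.mem_cons.mp hs with hs1 | hs1
      · rw [hs1] at hcz; rw [hcz] at hr; simp at hr
      · have := ih ⟨s, hs1, hcz⟩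
        simp [countLeadRows, hr]; omega
    · simp [countLeadRows, hr]

theorem getD_rev (g : List (List Int)) (y : Nat) (hy : y < g.length) :
    g.reverse.getD y [] = g.getD (g.length - 1 - y) [] := by
  simp [List.getD, List.getElem?_reverse (by simpa using hy)]

theorem clc_eq_clr (g : List (List Int)) (xs : List Nat) :
    countLeadCols g xs = countLeadRows (xs.map (colOf g)) := by
  induction xs with
  | nil => rfl
  | cons x t ih => by_cases h : checkAllZero (colOf g x) <;> simp [countLeadCols, countLeadRows, h, ih]

theorem colOf_mem_nonzero (grid : List (List Int)) (r : List Int) (hr : r ∈ grid)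
    (j : Nat) (hj : j < r.length) (hv : r[j] ≠ 0) :
    checkAllZero (colOf grid j) = false := by
  rw [cz_any]
  have hmem : r.getD j 0 ∈ colOf grid j := List.mem_map.mpr ⟨r, hr, rfl⟩
  have hget : r.getD j 0 = r[j] := List.getD_eq_getElem r 0 hj
  have : (colOf grid j).any (fun v => decide (v ≠ 0)) = true := by
    rw [List.any_eq_true]
    refine ⟨r.getD j 0, hmem, ?_⟩
    rw [hget]
    simpa using hv
  rw [this]
  rfl

-- membership in B's coordinate list
theorem mem_coords (grid : List (List Int)) (y x : Nat) :
    (y, x) ∈ coordsOf grid ↔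
      y < grid.length ∧ x < (grid.getD y []).length ∧ (grid.getD y []).getD x 0 ≠ 0 := by
  simp only [coordsOf, List.mem_flatMap, List.mem_map, List.mem_filter, List.mem_range]
  constructor
  · rintro ⟨y', hy', x', ⟨hx', hnz⟩, heq⟩
    injection heq with h1 h2
    subst h1; subst h2
    exact ⟨hy', hx', by simpa using hnz⟩
  · rintro ⟨hy, hx, hnz⟩
    exact ⟨y, hy, x, ⟨hx, by simpa using hnz⟩, rfl⟩

theorem row_nz_iff (r : List Int) :
    (∃ x, x < r.length ∧ r.getD x 0 ≠ 0) ↔ checkAllZero r = false := by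
  rw [cz_any]
  simp only [Bool.not_eq_eq_eq_not, Bool.not_false, List.any_eq_true, decide_eq_true_eq]
  constructor
  · rintro ⟨x, hx, hnz⟩
    refine ⟨r.getD x 0, ?_, hnz⟩
    rw [List.getD_eq_getElem r 0 hx]; exact List.getElem_mem hx
  · rintro ⟨v, hv, hnz⟩
    obtain ⟨x, hx, rfl⟩ := List.mem_iff_getElem.mp hv
    exact ⟨x, hx, by rw [List.getD_eq_getElem r 0 hx]; exact hnz⟩

theorem mem_fst_iff (grid : List (List Int)) (y : Nat) :
    y ∈ (coordsOf grid).map (fun p => p.1) ↔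
      y < grid.length ∧ checkAllZero (grid.getD y []) = false := by
  constructor
  · intro h
    obtain ⟨⟨y', x'⟩, hp, heq⟩ := List.mem_map.mp h
    simp only at heq
    subst heq
    obtain ⟨h1, h2, h3⟩ := (mem_coords grid y' x').mp hp
    exact ⟨h1, (row_nz_iff _).mp ⟨x', h2, h3⟩⟩
  · rintro ⟨hy, hcz⟩
    obtain ⟨x, hx, hnz⟩ := (row_nz_iff _).mpr hcz
    exact List.mem_map.mpr ⟨(y, x), (mem_coords grid y x).mpr ⟨hy, hx, hnz⟩, rfl⟩

theorem mem_snd_iff (grid : List (List Int)) (m : Nat)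
    (hrect : ∀ r ∈ grid, r.length = m) (x : Nat) :
    x ∈ (coordsOf grid).map (fun p => p.2) ↔
      x < m ∧ checkAllZero (colOf grid x) = false := by
  constructor
  · intro h
    obtain ⟨⟨y', x'⟩, hp, heq⟩ := List.mem_map.mp h
    simp only at heq
    subst heq
    obtain ⟨h1, h2, h3⟩ := (mem_coords grid y' x').mp hp
    have hrow : grid.getD y' [] ∈ grid := by
      rw [List.getD_eq_getElem grid [] h1]; exact List.getElem_mem h1
    refine ⟨by rw [← hrect _ hrow]; exact h2, ?_⟩
    refine colOf_mem_nonzero grid _ hrow x' h2 ?_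
    rw [← List.getD_eq_getElem (grid.getD y' []) 0 h2]
    exact h3
  · rintro ⟨hx, hcz⟩
    rw [cz_any, Bool.not_eq_eq_eq_not, Bool.not_false, List.any_eq_true] at hcz
    obtain ⟨v, hv, hnz⟩ := hcz
    obtain ⟨r, hr, rfl⟩ := List.mem_map.mp hv
    obtain ⟨y, hy, rfl⟩ := List.mem_iff_getElem.mp hr
    have hg : grid.getD y [] = grid[y] := List.getD_eq_getElem grid [] hy
    have hxr : x < grid[y].length := by
      by_contra hge
      have : grid[y].getD x 0 = 0 := List.getD_eq_default _ _ (by omega)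
      rw [this] at hnz; simp at hnz
    refine List.mem_map.mpr ⟨(y, x), (mem_coords grid y x).mpr ⟨hy, by rw [hg]; exact hxr, ?_⟩, rfl⟩
    rw [hg]; simpa using hnz

-- min/max of any list whose membership is 'index of a non-all-zero row of g'
theorem min_of_memiff (g : List (List Int)) (L : List Nat)
    (hmem : ∀ b, b ∈ L ↔ b < g.length ∧ checkAllZero (g.getD b []) = false)
    (hex : ∃ r ∈ g, checkAllZero r = false) :
    L.min? = some (countLeadRows g) := by
  rw [List.min?_eq_some_iff]
  constructor
  · rw [hmem]
    exact ⟨clr_lt_of_ex g hex, clr_stop g (clr_lt_of_ex g hex)⟩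
  · intro b hb
    rw [hmem] at hb
    by_contra hlt
    have := clr_lt_all g b (by omega)
    rw [this] at hb; simp at hb

theorem max_of_memiff (g : List (List Int)) (L : List Nat)
    (hmem : ∀ b, b ∈ L ↔ b < g.length ∧ checkAllZero (g.getD b []) = false)
    (hex : ∃ r ∈ g, checkAllZero r = false) :
    L.max? = some (g.length - 1 - countLeadRows g.reverse) := by
  have hexr : ∃ r ∈ g.reverse, checkAllZero r = false := by
    obtain ⟨r, hr, hc⟩ := hex; exact ⟨r, List.mem_reverse.mpr hr, hc⟩
  have hc : countLeadRows g.reverse < g.length := by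
    have := clr_lt_of_ex g.reverse hexr; simpa using this
  set c := countLeadRows g.reverse with hcdef
  rw [List.max?_eq_some_iff]
  constructor
  · rw [hmem]
    refine ⟨by omega, ?_⟩
    have := clr_stop g.reverse (by simpa using hc)
    rwa [getD_rev g c hc] at this
  · intro b hb
    rw [hmem] at hb
    by_contra hgt
    have h1 : g.length - 1 - b < c := by omega
    have := clr_lt_all g.reverse _ h1
    rw [getD_rev g _ (by omega)] at this
    have hb2 : g.length - 1 - (g.length - 1 - b) = b := by omega
    rw [hb2] at this
    rw [this] at hb; simp at hb

-- slice of a list as a map over its index range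
theorem take_drop_range' {α : Type} (r : List α) (d : α) (a w : Nat) (h : a + w ≤ r.length) :
    (r.drop a).take w = (List.range' a w).map (fun x => r.getD x d) := by
  induction w generalizing a with
  | zero => simp
  | succ k ih =>
    have ha : a < r.length := by omega
    rw [List.range'_succ, List.map_cons, ← ih (a + 1) (by omega)]
    rw [List.drop_eq_getElem_cons ha, List.take_succ_cons]
    simp [List.getD, List.getElem?_eq_getElem ha]

theorem getD_map_range'_lt {α : Type} (f : Nat → α) (s n k : Nat) (d : α) (hk : k < n) :
    ((List.range' s n).map f).getD k d = f (s + k) := by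
  rw [List.getD, List.getElem?_map]
  rw [List.getElem?_eq_getElem (by simpa using hk)]
  simp

theorem chars_join_nil (L : List (List Char)) : PySem.Chars.join [] L = L.flatten := by
  simp [PySem.Chars.join, List.intercalate]
  induction L with
  | nil => simp
  | cons a t ih => cases t <;> simp_all [List.intersperse]

theorem join_flat (rows : List (List Int)) :
    PySem.Str.join "" (rows.map (fun row => PySem.Str.join "" (row.map PySem.Int.toStr))) =
      PySem.Str.join "" ((rows.flatMap id).map PySem.Int.toStr) := by
  apply String.toList_injective
  rw [PySem.Str.toList_join, PySem.Str.toList_join]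
  rw [List.map_map, List.map_map]
  simp only [chars_join_nil, String.toList_empty]
  rw [List.flatMap_id]
  induction rows with
  | nil => simp
  | cons r rs ih =>
    simp only [List.map_cons, List.flatten_cons, List.map_append, List.flatten_append]
    congr 1
    rw [Function.comp_apply, PySem.Str.toList_join, List.map_map]
    simp [chars_join_nil]

theorem solve_eq_alt (grid : List (List Int)) (hpre : Pre_solve grid) :
    solve grid = solve_alt grid := by
  obtain ⟨hne, hrect, hany⟩ := hpre
  have hexr : ∃ r ∈ grid, checkAllZero r = false := by
    rw [List.any_eq_true] at hany
    obtain ⟨r, hr, hv⟩ := hany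
    exact ⟨r, hr, by rw [cz_any, hv]; rfl⟩
  set n := grid.length with hn
  set m := (grid.headD []).length with hm
  set G : List (List Int) := (List.range m).map (colOf grid) with hG
  have hGlen : G.length = m := by simp [hG]
  have hGget : ∀ x, x < m → G.getD x [] = colOf grid x := by
    intro x hx
    simp [hG, List.getD, List.getElem?_map, List.getElem?_range hx]
  have hexc : ∃ r ∈ G, checkAllZero r = false := by
    obtain ⟨r, hr, hc⟩ := hexr
    rw [cz_any, Bool.not_eq_eq_eq_not, Bool.not_false, List.any_eq_true] at hc
    obtain ⟨v, hv, hv0⟩ := hc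
    obtain ⟨j, hj, rfl⟩ := List.mem_iff_getElem.mp hv
    have hjm : j < m := by rw [← hrect r hr]; exact hj
    refine ⟨colOf grid j, List.mem_map.mpr ⟨j, List.mem_range.mpr hjm, rfl⟩, ?_⟩
    exact colOf_mem_nonzero grid r hr j hj (by simpa using hv0)
  -- the four box bounds, and B's min/max expressed through them
  set y0 := countLeadRows grid with hy0
  set cB := countLeadRows grid.reverse with hcB
  set x0 := countLeadRows G with hx0
  set cX := countLeadRows G.reverse with hcX
  have hymin : ((coordsOf grid).map (fun p => p.1)).min? = some y0 :=
    min_of_memiff grid _ (fun b => mem_fst_iff grid b) hexr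
  have hymax : ((coordsOf grid).map (fun p => p.1)).max? = some (n - 1 - cB) :=
    max_of_memiff grid _ (fun b => mem_fst_iff grid b) hexr
  have hsnd : ∀ b, b ∈ (coordsOf grid).map (fun p => p.2) ↔
      b < G.length ∧ checkAllZero (G.getD b []) = false := by
    intro b
    rw [mem_snd_iff grid m (fun r hr => hrect r hr) b, hGlen]
    constructor
    · rintro ⟨h1, h2⟩; exact ⟨h1, by rw [hGget b h1]; exact h2⟩
    · rintro ⟨h1, h2⟩; exact ⟨h1, by rw [← hGget b h1]; exact h2⟩
  have hxmin : ((coordsOf grid).map (fun p => p.2)).min? = some x0 :=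
    min_of_memiff G _ hsnd hexc
  have hxmax : ((coordsOf grid).map (fun p => p.2)).max? = some (m - 1 - cX) := by
    have := max_of_memiff G _ hsnd hexc
    rwa [hGlen] at this
  have hcBlt : cB < n := by
    have := clr_lt_of_ex grid.reverse (by
      obtain ⟨r, hr, hc⟩ := hexr; exact ⟨r, List.mem_reverse.mpr hr, hc⟩)
    simpa using this
  have hcXlt : cX < m := by
    have := clr_lt_of_ex G.reverse (by
      obtain ⟨r, hr, hc⟩ := hexc; exact ⟨r, List.mem_reverse.mpr hr, hc⟩)
    simpa [hGlen] using this
  have hy0le : y0 ≤ n - 1 - cB := by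
    obtain ⟨_, hlb⟩ := List.min?_eq_some_iff.mp hymin
    obtain ⟨hmem, _⟩ := List.max?_eq_some_iff.mp hymax
    exact hlb _ hmem
  have hx0le : x0 ≤ m - 1 - cX := by
    obtain ⟨_, hlb⟩ := List.min?_eq_some_iff.mp hxmin
    obtain ⟨hmem, _⟩ := List.max?_eq_some_iff.mp hxmax
    exact hlb _ hmem
  -- A's column counts are row counts of G
  have hclc0 : countLeadCols grid (List.range m) = x0 := by
    rw [clc_eq_clr]
  have hclc1 : countLeadCols grid ((List.range m).reverse) = cX := by
    rw [clc_eq_clr, hcX, ← List.map_reverse]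
  -- box dimensions
  set h := n - 1 - cB + 1 - y0 with hh
  set w := m - 1 - cX + 1 - x0 with hw
  have hhpos : 0 < h := by omega
  have hwpos : 0 < w := by omega
  -- A's crop as a map over the index box
  have hcrop :
      ((grid.drop y0).take (n - cB - y0)).map (fun i => (i.drop x0).take (m - cX - x0)) =
        (List.range' y0 h).map (fun y =>
          (List.range' x0 w).map (fun x => (grid.getD y []).getD x 0)) := by
    rw [show n - cB - y0 = h by omega, show m - cX - x0 = w by omega]
    rw [take_drop_range' grid ([] : List Int) y0 h (by omega)]
    rw [List.map_map]
    refine List.map_congr_left ?_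
    intro y hy
    have hyn : y < n := by
      have := List.mem_range'.mp hy; omega
    have hrowlen : (grid.getD y []).length = m := by
      refine hrect _ ?_
      rw [List.getD_eq_getElem grid [] hyn]; exact List.getElem_mem hyn
    exact take_drop_range' (grid.getD y []) 0 x0 w (by omega)
  -- unfold both sides
  simp only [solve, solve_alt, deleteBlank]
  rw [hymin, hymax, hxmin, hxmax, hclc0, hclc1]
  simp only [Option.getD_some, ← hn, ← hm]
  rw [hcrop, ← hh, ← hw]
  set S := (List.range' y0 h).map (fun y =>
      (List.range' x0 w).map (fun x => (grid.getD y []).getD x 0)) with hS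
  have hSlen : S.length = h := by simp [hS]
  have hShead : (S.headD []).length = w := by
    rw [hS]
    cases hhe : List.range' y0 h with
    | nil => exfalso; have := List.range'_eq_nil_iff.mp hhe; omega
    | cons a t => simp
  have hcond : (S.length > (S.headD []).length) = (n - 1 - cB - y0 > m - 1 - cX - x0) := by
    rw [hSlen, hShead]
    simp only [eq_iff_iff]
    omega
  by_cases hgt : n - 1 - cB - y0 > m - 1 - cX - x0
  · -- taller than wide: A rotates, B serializes column-major
    have hc2 : S.length > (S.headD []).length := by rw [hcond]; exact hgt
    have hrot : rotateGrid S = (List.range w).map (fun x =>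
        (List.range h).map (fun y => (grid.getD (y0 + y) []).getD (x0 + x) 0)) := by
      rw [rotateGrid, hShead, hSlen]
      refine List.map_congr_left ?_
      intro x hx
      refine List.map_congr_left ?_
      intro y hy
      rw [hS, getD_map_range'_lt _ y0 h y [] (List.mem_range.mp hy)]
      rw [getD_map_range'_lt _ x0 w x 0 (List.mem_range.mp hx)]
    have hlist : ((rotateGrid S).flatMap id).map PySem.Int.toStr =
        ((List.range' x0 w).flatMap (fun x => (List.range' y0 h).map (fun y => (y, x)))).map
          (fun p => PySem.Int.toStr ((grid.getD p.1 []).getD p.2 0)) := by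
      rw [hrot, List.range'_eq_map_range, List.range'_eq_map_range]
      simp [id_eq, Function.comp_def, List.flatMap_map, List.map_flatMap, List.map_map]
    rw [if_pos hc2, if_pos hgt, join_flat, hlist]
  · have hc2 : ¬ S.length > (S.headD []).length := by rw [hcond]; exact hgt
    have hlist : ((S).flatMap id).map PySem.Int.toStr =
        ((List.range' y0 h).flatMap (fun y => (List.range' x0 w).map (fun x => (y, x)))).map
          (fun p => PySem.Int.toStr ((grid.getD p.1 []).getD p.2 0)) := by
      rw [hS, List.range'_eq_map_range, List.range'_eq_map_range]
      simp [id_eq, Function.comp_def, List.flatMap_map, List.map_flatMap, List.map_map]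
    rw [if_neg hc2, if_neg hgt, join_flat, hlist]

-- ===== VERDICT (by name: the statement is the Claim_ definition above) =====
theorem solve_spec : Claim_equal_solve := by
  intro grid _ hpre
  unfold Spec_solve
  exact solve_eq_alt grid hpre
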